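-- pv_equiv track=rewrite | github.com/amanuel1271/Problem-Solving | LZ77.py | compute_all_found
-- ===== SOURCE A (Python) =====
-- def all_past_symb_found(past_symbols,seq,i):
--     past_symbol_len = len(past_symbols)
--     next_index = i + past_symbol_len - 1
--     return (next_index < len(seq)) and (past_symbols == seq[i:next_index + 1])
--
-- def compute_all_found(start_index,i,past_sym,seq):
--     past_seq_len,initial_index = len(past_sym), i
--     match_len,i = past_seq_len, i + past_seq_len
--
--     while all_past_symb_found(past_sym,seq,i):
--         match_len,i =  match_len + past_seq_len, i + past_seq_len
--
--     seq_len = len(seq)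
--     if (i < seq_len) and (seq[i] == past_sym[0]):
--         if (i + past_seq_len) > seq_len: # end out of bounds
--             partial_match_str = seq[i:seq_len]
--         else:
--             partial_match_str = seq[i:i + past_seq_len]
--
--         while partial_match_str != past_sym[:len(partial_match_str)]: ## will atleast match with length 1
--             partial_match_str = partial_match_str[:-1]
--
--         match_len, i = match_len + len(partial_match_str), i + len(partial_match_str)
--         return i,('1',str(initial_index - start_index),str(match_len))
--
--     else: ## finished matching
--         return i,('1',str(initial_index - start_index),str(match_len))
-- ===== SOURCE B (Python) =====
-- def compute_all_found(start_index, i, past_sym, seq):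
--     # One flat character-by-character scan of the periodic match region,
--     # instead of A's block loop plus quadratic suffix-trimming loop.
--     L = len(past_sym)
--     initial_index = i
--     n = len(seq)
--     j = i + L
--     count = L
--     while j < n and seq[j] == past_sym[(j - initial_index) % L]:
--         count += 1
--         j += 1
--     return j, ('1', str(initial_index - start_index), str(count))
-- ===== Notes on version B (the rewrite author's own statement) =====
-- stated objective: simpler
-- what changed: Replaces A's whole-block matching loop plus a quadratic trailing prefix-trim loop with a single flat character-by-character scan comparing seq[j] to past_sym[(j-i) % len(past_sym)].
-- outside the precondition, e.g. on compute_all_found(0, 0, '', 'a'): A does not finish within the time limit, B raises ZeroDivisionError; on compute_all_found(0, -2, 'a', 'bbaa'): A returns (-1, ('1', '-2', '1')), B returns (0, ('1', '-2', '2'))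
import Mathlib
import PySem

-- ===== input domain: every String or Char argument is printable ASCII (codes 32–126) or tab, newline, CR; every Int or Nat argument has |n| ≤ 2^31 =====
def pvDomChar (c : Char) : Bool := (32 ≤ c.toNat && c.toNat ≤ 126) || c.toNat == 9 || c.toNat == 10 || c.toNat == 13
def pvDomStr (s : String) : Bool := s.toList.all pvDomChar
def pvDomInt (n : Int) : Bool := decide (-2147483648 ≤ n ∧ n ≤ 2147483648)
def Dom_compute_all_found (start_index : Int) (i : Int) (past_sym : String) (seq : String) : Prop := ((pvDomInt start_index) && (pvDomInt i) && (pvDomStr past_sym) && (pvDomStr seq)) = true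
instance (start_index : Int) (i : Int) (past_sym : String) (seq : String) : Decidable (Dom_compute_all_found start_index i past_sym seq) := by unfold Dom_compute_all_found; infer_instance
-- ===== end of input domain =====

-- B replaces A's whole-block match loop plus trailing prefix-trim loop by one flat
-- character-by-character scan; equivalence is proved on non-empty past_sym and 0 ≤ i.

-- ===== PORT A =====
-- helper all_past_symb_found, on the code points of the strings
def pvAllFound (past_symbols : List Char) (seq : List Char) (i : Int) : Bool :=
  let past_symbol_len : Int := past_symbols.length
  let next_index := i + past_symbol_len - 1
  (next_index < (seq.length : Int)) && decide (past_symbols = PySem.List.slice seq (some i) (some (next_index + 1)))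

-- the 'while all_past_symb_found' loop; fuel only makes it total (it bounds the
-- iterations, which are < len(seq)+1 whenever past_sym ≠ '', i.e. inside Pre_)
def pvLoopA (p s : List Char) : Nat → Int → Int → Int × Int
  | 0, match_len, i => (match_len, i)
  | fuel+1, match_len, i =>
    if pvAllFound p s i then
      pvLoopA p s fuel (match_len + (p.length : Int)) (i + (p.length : Int))
    else (match_len, i)

-- the 'while partial_match_str != past_sym[:len(partial_match_str)]' trim loop ([:-1] = dropLast)
def pvTrim (p : List Char) (t : List Char) : List Char :=
  if h : ¬ (t = p.take t.length) then pvTrim p t.dropLast else t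
termination_by t.length
decreasing_by
  have ht : t ≠ [] := by intro he; exact h (by simp [he])
  have : 0 < t.length := List.length_pos_iff.mpr ht
  simp [List.length_dropLast]; omega

-- the tail of compute_all_found after the while loop: takes (match_len, i),
-- returns the final (i, match_len)
def pvPartial (p s : List Char) (match_len : Int) (i : Int) : Int × Int :=
  let past_seq_len : Int := p.length
  let seq_len : Int := s.length
  if i < seq_len ∧ PySem.List.pyGet? s i = PySem.List.pyGet? p 0 then
    let partial_match_str :=
      if i + past_seq_len > seq_len then PySem.List.slice s (some i) (some seq_len)
      else PySem.List.slice s (some i) (some (i + past_seq_len))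
    let pm := pvTrim p partial_match_str
    (i + (pm.length : Int), match_len + (pm.length : Int))
  else (i, match_len)

def compute_all_found (start_index : Int) (i : Int) (past_sym : String) (seq : String) : Int × (String × String × String) :=
  let p := past_sym.toList
  let s := seq.toList
  let past_seq_len : Int := p.length
  let initial_index := i
  let r := pvLoopA p s (s.length + 1) past_seq_len (i + past_seq_len)
  let q := pvPartial p s r.1 r.2
  (q.1, ("1", PySem.Int.toStr (initial_index - start_index), PySem.Int.toStr q.2))

-- ===== PORT B =====
-- the flat scan: while j < n and seq[j] == past_sym[(j - initial_index) % L]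
def pvScanB (p s : List Char) (init L n : Int) (j count : Int) : Int × Int :=
  if h : j < n ∧ PySem.List.pyGet? s j = PySem.List.pyGet? p (PySem.Int.mod (j - init) L) then
    pvScanB p s init L n (j + 1) (count + 1)
  else (j, count)
termination_by (n - j).toNat
decreasing_by omega

def compute_all_found_alt (start_index : Int) (i : Int) (past_sym : String) (seq : String) : Int × (String × String × String) :=
  let p := past_sym.toList
  let s := seq.toList
  let L : Int := p.length
  let initial_index := i
  let n : Int := s.length
  let r := pvScanB p s initial_index L n (i + L) L
  (r.1, ("1", PySem.Int.toStr (initial_index - start_index), PySem.Int.toStr r.2))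

-- ===== PRECONDITION & SPEC =====
-- Pre_ excludes past_sym = '' (A's while loop never terminates there, A returns nothing)
-- and i < 0 (outside the natural domain of an LZ77 cursor: Python's negative-index/slice
-- wraparound makes A's values there accidents of its implementation that B does not reproduce).
def Pre_compute_all_found (start_index : Int) (i : Int) (past_sym : String) (seq : String) : Prop :=
  past_sym.toList ≠ [] ∧ 0 ≤ i
instance (start_index : Int) (i : Int) (past_sym : String) (seq : String) : Decidable (Pre_compute_all_found start_index i past_sym seq) := by unfold Pre_compute_all_found; infer_instance

def pvWitness_compute_all_found : Int × Int × String × String := (0, 0, "ab", "ababa")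

def Spec_compute_all_found (start_index : Int) (i : Int) (past_sym : String) (seq : String) (out : Int × (String × String × String)) : Prop := out = compute_all_found_alt start_index i past_sym seq
instance (start_index : Int) (i : Int) (past_sym : String) (seq : String) (out : Int × (String × String × String)) : Decidable (Spec_compute_all_found start_index i past_sym seq out) := by unfold Spec_compute_all_found; infer_instance

-- ===== CLAIM (what is proved, stated in full; the proofs are below) =====
def Claim_equal_compute_all_found : Prop := ∀ (start_index : Int) (i : Int) (past_sym : String) (seq : String), Dom_compute_all_found start_index i past_sym seq → Pre_compute_all_found start_index i past_sym seq → Spec_compute_all_found start_index i past_sym seq (compute_all_found start_index i past_sym seq)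

-- ===== LEMMAS AND PROOFS =====

-- longest common prefix length of two lists
def pvLcp : List Char → List Char → Nat
  | a :: as, b :: bs => if a = b then pvLcp as bs + 1 else 0
  | _, _ => 0

lemma pvLcp_le_left (a b : List Char) : pvLcp a b ≤ a.length := by
  induction a generalizing b with
  | nil => simp [pvLcp]
  | cons x xs ih =>
    cases b with
    | nil => simp [pvLcp]
    | cons y ys => simp only [pvLcp]; split <;> simp [Nat.succ_le_succ (ih ys)]

lemma pvLcp_le_right (a b : List Char) : pvLcp a b ≤ b.length := by
  induction a generalizing b with
  | nil => simp [pvLcp]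
  | cons x xs ih =>
    cases b with
    | nil => simp [pvLcp]
    | cons y ys => simp only [pvLcp]; split <;> simp [Nat.succ_le_succ (ih ys)]

lemma pvLcp_get (a b : List Char) (r : Nat) (h : r < pvLcp a b) : a[r]? = b[r]? := by
  induction a generalizing b r with
  | nil => simp [pvLcp] at h
  | cons x xs ih =>
    cases b with
    | nil => simp [pvLcp] at h
    | cons y ys =>
      simp only [pvLcp] at h
      by_cases hxy : x = y
      · simp [hxy] at h
        cases r with
        | zero => simp [hxy]
        | succ r' => simpa using ih ys r' (by omega)
      · simp [hxy] at h

lemma pvLcp_ne (a b : List Char) (h1 : pvLcp a b < a.length) (h2 : pvLcp a b < b.length) :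
    a[pvLcp a b]? ≠ b[pvLcp a b]? := by
  induction a generalizing b with
  | nil => simp at h1
  | cons x xs ih =>
    cases b with
    | nil => simp at h2
    | cons y ys =>
      simp only [pvLcp] at *
      by_cases hxy : x = y
      · simp [hxy] at h1 h2 ⊢
        exact ih ys (by omega) (by omega)
      · simp [hxy]

lemma pvLcp_eq_length_iff (t p : List Char) : pvLcp t p = t.length ↔ t = p.take t.length := by
  induction t generalizing p with
  | nil => simp [pvLcp]
  | cons x xs ih =>
    cases p with
    | nil => simp [pvLcp]
    | cons y ys =>
      simp only [pvLcp, List.length_cons, List.take_succ_cons]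
      by_cases hxy : x = y
      · simp [hxy, ih]
      · have := pvLcp_le_left xs ys
        constructor
        · intro h; simp [hxy] at h
        · intro h; exact absurd (List.cons.injEq .. ▸ h).1 hxy

lemma pvLcp_take (t p : List Char) (k : Nat) : pvLcp (t.take k) p = min k (pvLcp t p) := by
  induction t generalizing p k with
  | nil => simp [pvLcp]
  | cons x xs ih =>
    cases p with
    | nil => simp [pvLcp]
    | cons y ys =>
      cases k with
      | zero => simp [pvLcp]
      | succ k' =>
        simp only [List.take_succ_cons, pvLcp]
        by_cases hxy : x = y
        · simp [hxy, ih]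
        · simp [hxy]

lemma pvTrim_eq (p t : List Char) : pvTrim p t = t.take (pvLcp t p) := by
  induction t using pvTrim.induct p with
  | case2 t h =>
    rw [not_not] at h
    rw [pvTrim, dif_neg (by simpa using h)]
    have : pvLcp t p = t.length := (pvLcp_eq_length_iff t p).mpr h
    simp [this]
  | case1 t h ih =>
    rw [pvTrim, dif_pos (by simpa using h)]
    rw [ih]
    have hlt : pvLcp t p < t.length := by
      have hle := pvLcp_le_left t p
      rcases Nat.lt_or_ge (pvLcp t p) t.length with h' | h'
      · exact h'
      · exact absurd ((pvLcp_eq_length_iff t p).mp (by omega)) h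
    have hdl : pvLcp t.dropLast p = pvLcp t p := by
      rw [List.dropLast_eq_take, pvLcp_take]; omega
    rw [hdl]
    rw [List.dropLast_eq_take, List.take_take]
    congr 1
    omega


lemma pvScanB_stop (p s : List Char) (init L n j c : Int)
    (h : ¬ (j < n ∧ PySem.List.pyGet? s j = PySem.List.pyGet? p (PySem.Int.mod (j - init) L))) :
    pvScanB p s init L n j c = (j, c) := by
  rw [pvScanB, dif_neg h]

lemma pvScanB_step (p s : List Char) (init L n j c : Int)
    (h : j < n ∧ PySem.List.pyGet? s j = PySem.List.pyGet? p (PySem.Int.mod (j - init) L)) :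
    pvScanB p s init L n j c = pvScanB p s init L n (j + 1) (c + 1) := by
  rw [pvScanB, dif_pos h]

lemma pvScanB_steps (p s : List Char) (init L n : Int) (k : Nat) :
    ∀ (j c : Int),
      (∀ t : Nat, t < k → (j + (t : Int) < n ∧
        PySem.List.pyGet? s (j + (t : Int)) = PySem.List.pyGet? p (PySem.Int.mod (j + (t : Int) - init) L))) →
      pvScanB p s init L n j c = pvScanB p s init L n (j + (k : Int)) (c + (k : Int)) := by
  induction k with
  | zero => intro j c _; simp
  | succ k' ih =>
    intro j c h
    have h0 := h 0 (by omega)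
    simp only [Nat.cast_zero, add_zero] at h0
    rw [pvScanB_step p s init L n j c h0]
    have harg : ∀ t : Nat, t < k' → ((j + 1) + (t : Int) < n ∧
        PySem.List.pyGet? s ((j + 1) + (t : Int)) = PySem.List.pyGet? p (PySem.Int.mod ((j + 1) + (t : Int) - init) L)) := by
      intro t ht
      have he : (j + 1) + (t : Int) = j + ((t + 1 : Nat) : Int) := by push_cast; ring
      rw [he]
      exact h (t + 1) (by omega)
    have e1 : j + ((k' + 1 : Nat) : Int) = (j + 1) + (k' : Int) := by push_cast; ring
    have e2 : c + ((k' + 1 : Nat) : Int) = (c + 1) + (k' : Int) := by push_cast; ring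
    rw [e1, e2]
    exact ih (j + 1) (c + 1) harg

lemma pv_mod_offset (L : Int) (hL : 0 < L) (d : Int) (hdvd : L ∣ d) (t : Nat) (ht : (t : Int) < L) :
    PySem.Int.mod (d + (t : Int)) L = (t : Int) := by
  obtain ⟨q, hq⟩ := hdvd
  rw [PySem.Int.mod_eq_emod_of_pos hL, hq,
      show L * q + (t : Int) = (t : Int) + L * q by ring, Int.add_mul_emod_self_left]
  exact Int.emod_eq_of_lt (Int.natCast_nonneg t) ht

lemma pvAllFound_iff (p s : List Char) (m : Int) :
    pvAllFound p s m = true ↔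
      (m + (p.length : Int) - 1 < (s.length : Int) ∧
       p = PySem.List.slice s (some m) (some (m + (p.length : Int) - 1 + 1))) := by
  simp [pvAllFound]

lemma pv_tail (p s : List Char) (i m ml : Int) (hi : 0 ≤ i) (him : i ≤ m)
    (hL : 0 < p.length) (hdvd : (p.length : Int) ∣ (m - i))
    (hnc : ¬ pvAllFound p s m = true) :
    pvPartial p s ml m = pvScanB p s i (p.length : Int) (s.length : Int) m ml := by
  have hm0 : 0 ≤ m := le_trans hi him
  have hL1 : (1 : Int) ≤ (p.length : Int) := by exact_mod_cast hL
  by_cases hmn : m < (s.length : Int)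
  case neg =>
    rw [pvScanB_stop _ _ _ _ _ _ _ (fun hcc => hmn hcc.1)]
    unfold pvPartial
    rw [if_neg (fun hcc => hmn hcc.1)]
  case pos =>
  have hm' : m.toNat < s.length := by omega
  have hgets : PySem.List.pyGet? s m = s[m.toNat]? := PySem.List.pyGet?_of_nonneg s hm0
  have hmod0 : PySem.Int.mod (m - i) (p.length : Int) = 0 :=
    (PySem.Int.mod_eq_zero_iff_dvd _ _).mpr hdvd
  have hget0 : PySem.List.pyGet? p 0 = p[0]? := PySem.List.pyGet?_zero p
  by_cases hc : s[m.toNat]? = p[0]?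
  case neg =>
    rw [pvScanB_stop]
    · unfold pvPartial
      rw [if_neg]
      intro hcc
      exact hc (by rw [← hgets, hcc.2, hget0])
    · intro hcc
      have h2 := hcc.2
      rw [hmod0, hget0, hgets] at h2
      exact hc h2
  case pos =>
    set K : Nat := min p.length (s.length - m.toNat) with hKdef
    set t0 : List Char := (s.drop m.toNat).take K with ht0def
    set k : Nat := pvLcp t0 p with hkdef
    have ht0len : t0.length = K := by
      rw [ht0def]; simp [List.length_take, List.length_drop]; omega
    have hkK : k ≤ K := ht0len ▸ pvLcp_le_left t0 p
    have hkp : k ≤ p.length := pvLcp_le_right t0 p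
    have hKp : K ≤ p.length := min_le_left _ _
    have hKs : K ≤ s.length - m.toNat := min_le_right _ _
    have hchar : ∀ t : Nat, t < K → s[m.toNat + t]? = t0[t]? := by
      intro t ht
      rw [ht0def, List.getElem?_take_of_lt ht, List.getElem?_drop]
    have hpartial : pvPartial p s ml m = (m + (k : Int), ml + (k : Int)) := by
      unfold pvPartial
      rw [if_pos ⟨hmn, by rw [hgets, hget0]; exact hc⟩]
      have hslice :
          (if m + (p.length : Int) > (s.length : Int) then
            PySem.List.slice s (some m) (some (s.length : Int))
          else PySem.List.slice s (some m) (some (m + (p.length : Int)))) = t0 := by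
        split
        case isTrue h =>
          rw [PySem.List.slice_toNat s hm0 (by positivity), ht0def]
          congr 1
          omega
        case isFalse h =>
          rw [PySem.List.slice_toNat s hm0 (by omega), ht0def]
          congr 1
          omega
      have hln : (t0.take k).length = k := by
        simp [List.length_take]; omega
      simp only [hslice, pvTrim_eq, ← hkdef, hln]
    have hmatch : ∀ t : Nat, t < k → (m + (t : Int) < (s.length : Int) ∧
        PySem.List.pyGet? s (m + (t : Int)) =
          PySem.List.pyGet? p (PySem.Int.mod (m + (t : Int) - i) (p.length : Int))) := by
      intro t ht
      have htK : t < K := lt_of_lt_of_le ht hkK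
      have hbound : m + (t : Int) < (s.length : Int) := by omega
      refine ⟨hbound, ?_⟩
      have h1 : PySem.List.pyGet? s (m + (t : Int)) = s[m.toNat + t]? := by
        rw [PySem.List.pyGet?_of_nonneg s (by omega)]
        congr 1
        omega
      have hmod : PySem.Int.mod (m + (t : Int) - i) (p.length : Int) = (t : Int) := by
        rw [show m + (t : Int) - i = (m - i) + (t : Int) by ring]
        exact pv_mod_offset _ (by omega) _ hdvd t (by exact_mod_cast lt_of_lt_of_le htK hKp)
      rw [h1, hmod, PySem.List.pyGet?_natCast, hchar t htK, pvLcp_get t0 p t ht]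
    have hscan1 : pvScanB p s i (p.length : Int) (s.length : Int) m ml
        = pvScanB p s i (p.length : Int) (s.length : Int) (m + (k : Int)) (ml + (k : Int)) :=
      pvScanB_steps p s i _ _ k m ml hmatch
    have hstop : pvScanB p s i (p.length : Int) (s.length : Int) (m + (k : Int)) (ml + (k : Int))
        = (m + (k : Int), ml + (k : Int)) := by
      apply pvScanB_stop
      rintro ⟨hlt, heq⟩
      by_cases hkK' : k < K
      · have h1 : k < t0.length := ht0len ▸ hkK'
        have h2 : k < p.length := lt_of_lt_of_le hkK' hKp
        have hne := pvLcp_ne t0 p h1 h2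
        have hmod : PySem.Int.mod (m + (k : Int) - i) (p.length : Int) = (k : Int) := by
          rw [show m + (k : Int) - i = (m - i) + (k : Int) by ring]
          exact pv_mod_offset _ (by omega) _ hdvd k (by exact_mod_cast h2)
        have hsk : PySem.List.pyGet? s (m + (k : Int)) = s[m.toNat + k]? := by
          rw [PySem.List.pyGet?_of_nonneg s (by omega)]
          congr 1
          omega
        rw [hsk, hmod, PySem.List.pyGet?_natCast, hchar k hkK'] at heq
        exact hne heq
      · have hkKeq : k = K := by omega
        by_cases hKL : p.length ≤ s.length - m.toNat
        · -- full block matched: contradicts hnc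
          have hKpe : K = p.length := by omega
          have ht0p : t0 = p := by
            have h1 : pvLcp t0 p = t0.length := by rw [ht0len, ← hkKeq, hkdef]
            have h2 := (pvLcp_eq_length_iff t0 p).mp h1
            rw [ht0len, hKpe, List.take_length] at h2
            exact h2
          apply absurd _ hnc
          rw [pvAllFound_iff]
          refine ⟨by omega, ?_⟩
          rw [show m + (p.length : Int) - 1 + 1 = m + (p.length : Int) by ring,
              PySem.List.slice_toNat s hm0 (by omega)]
          rw [show (m + (p.length : Int)).toNat - m.toNat = K by omega]
          exact ht0p.symm
        · -- ran to the end of seq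
          have : (K : Int) = (s.length : Int) - m := by omega
          omega
    rw [hpartial, hscan1, hstop]

lemma pv_main (p s : List Char) (i : Int) (hi : 0 ≤ i) (hL : 0 < p.length) :
    ∀ (fuel : Nat) (m ml : Int), i ≤ m → (p.length : Int) ∣ (m - i) →
      (s.length : Int) - m ≤ (fuel : Int) →
      pvPartial p s (pvLoopA p s fuel ml m).1 (pvLoopA p s fuel ml m).2
        = pvScanB p s i (p.length : Int) (s.length : Int) m ml := by
  intro fuel
  induction fuel with
  | zero =>
    intro m ml him hdvd hfuel
    have hnc : ¬ pvAllFound p s m = true := by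
      rw [pvAllFound_iff]
      rintro ⟨h1, -⟩
      have hL1 : (1 : Int) ≤ (p.length : Int) := by exact_mod_cast hL
      simp only [Nat.cast_zero] at hfuel
      omega
    simpa [pvLoopA] using pv_tail p s i m ml hi him hL hdvd hnc
  | succ f ih =>
    intro m ml him hdvd hfuel
    rw [pvLoopA]
    by_cases hcond : pvAllFound p s m = true
    · rw [if_pos hcond]
      obtain ⟨hb, hsl⟩ := (pvAllFound_iff p s m).mp hcond
      have hm0 : 0 ≤ m := le_trans hi him
      have hL1 : (1 : Int) ≤ (p.length : Int) := by exact_mod_cast hL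
      rw [show m + (p.length : Int) - 1 + 1 = m + (p.length : Int) by ring,
          PySem.List.slice_toNat s hm0 (by omega)] at hsl
      have hmatch : ∀ t : Nat, t < p.length → (m + (t : Int) < (s.length : Int) ∧
          PySem.List.pyGet? s (m + (t : Int)) =
            PySem.List.pyGet? p (PySem.Int.mod (m + (t : Int) - i) (p.length : Int))) := by
        intro t ht
        refine ⟨by omega, ?_⟩
        have hmod : PySem.Int.mod (m + (t : Int) - i) (p.length : Int) = (t : Int) := by
          rw [show m + (t : Int) - i = (m - i) + (t : Int) by ring]
          exact pv_mod_offset _ (by omega) _ hdvd t (by exact_mod_cast ht)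
        have h1 : PySem.List.pyGet? s (m + (t : Int)) = s[m.toNat + t]? := by
          rw [PySem.List.pyGet?_of_nonneg s (by omega)]
          congr 1
          omega
        have h2 : p[t]? = s[m.toNat + t]? := by
          rw [hsl, List.getElem?_take_of_lt (by omega), List.getElem?_drop]
        rw [h1, hmod, PySem.List.pyGet?_natCast, h2]
      rw [pvScanB_steps p s i _ _ p.length m ml hmatch]
      exact ih (m + (p.length : Int)) (ml + (p.length : Int)) (by omega)
        (by obtain ⟨q, hq⟩ := hdvd; exact ⟨q + 1, by rw [show m + (p.length:Int) - i = (m - i) + (p.length:Int) by ring, hq]; ring⟩)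
        (by push_cast at hfuel ⊢; omega)
    · rw [if_neg hcond]
      exact pv_tail p s i m ml hi him hL hdvd hcond

lemma pv_toList_ne_nil (t : String) (h : t.toList ≠ []) : 0 < t.toList.length :=
  List.length_pos_iff.mpr h

-- ===== VERDICT (by name: the statement is the Claim_ definition above) =====
theorem compute_all_found_spec : Claim_equal_compute_all_found := by
  unfold Claim_equal_compute_all_found
  intro start_index i past_sym seq _ hpre
  obtain ⟨hne, hi⟩ := hpre
  unfold Spec_compute_all_found compute_all_found compute_all_found_alt
  have hL : 0 < past_sym.toList.length := pv_toList_ne_nil past_sym hne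
  have hmain := pv_main past_sym.toList seq.toList i hi hL (seq.toList.length + 1)
      (i + (past_sym.toList.length : Int)) (past_sym.toList.length : Int)
      (by omega) (⟨1, by ring⟩) (by push_cast; omega)
  simp only []
  rw [hmain]
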